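-- pv_equiv track=rewrite | github.com/syamyenubari/simple_maya_mirror_pose | simple_mirror_pose_addon(blender).py | get_opposite_suffix
-- ===== SOURCE A (Python) =====
-- def get_opposite_suffix(name):
--     suffixes = {
--         'L': 'R', 'l': 'r', 'R': 'L', 'r': 'l',
--         '_L': '_R', '_l': '_r', '_R': '_L', '_r': '_l',
--         '.L': '.R', '.l': '.r', '.R': '.L', '.r': '.l'
--     }
--     for suffix, opposite in suffixes.items():
--         if name.endswith(suffix):
--             return name[:-len(suffix)] + opposite
--     return None
-- ===== SOURCE B (Python) =====
-- def get_opposite_suffix(name):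
--     mapping = {'L': 'R', 'l': 'r', 'R': 'L', 'r': 'l'}
--     if name and name[-1] in mapping:
--         return name[:-1] + mapping[name[-1]]
--     return None
-- ===== Notes on version B (the rewrite author's own statement) =====
-- stated objective: simpler
-- what changed: Replaced the 12-entry suffix loop with endswith calls by a single lookup on the last character (the multi-character suffixes in A are unreachable because the single-character keys are tested first).
import Mathlib
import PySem

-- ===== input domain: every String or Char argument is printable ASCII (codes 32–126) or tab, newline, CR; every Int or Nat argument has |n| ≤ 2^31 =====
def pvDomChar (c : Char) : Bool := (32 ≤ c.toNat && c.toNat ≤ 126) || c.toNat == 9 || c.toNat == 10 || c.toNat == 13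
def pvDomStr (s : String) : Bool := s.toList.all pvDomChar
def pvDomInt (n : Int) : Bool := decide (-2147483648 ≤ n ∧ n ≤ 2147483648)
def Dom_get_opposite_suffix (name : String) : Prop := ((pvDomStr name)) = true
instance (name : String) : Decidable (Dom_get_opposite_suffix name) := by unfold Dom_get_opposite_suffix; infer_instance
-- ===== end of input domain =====

-- B replaces A's 12-entry suffix loop by one lookup on the last character (simpler; same result).

-- ===== PORT A =====
-- A's dict of suffixes, in insertion order, as (suffix, opposite) pairs over List Char.
def pvSuffixesA : List (List Char × List Char) :=
  [(['L'], ['R']), (['l'], ['r']), (['R'], ['L']), (['r'], ['l']),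
   (['_','L'], ['_','R']), (['_','l'], ['_','r']), (['_','R'], ['_','L']), (['_','r'], ['_','l']),
   (['.','L'], ['.','R']), (['.','l'], ['.','r']), (['.','R'], ['.','L']), (['.','r'], ['.','l'])]

-- A's for-loop: first suffix with name.endswith(suffix) wins; name[:-len(suffix)] + opposite.
def pvLoopA (s : List Char) : List (List Char × List Char) → Option (List Char)
  | [] => none
  | (suf, opp) :: rest =>
    if PySem.Chars.endswith s suf then
      some (PySem.List.slice s none (some (-(suf.length : Int))) ++ opp)
    else pvLoopA s rest

def get_opposite_suffix (name : String) : Option String :=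
  (pvLoopA name.toList pvSuffixesA).map String.ofList

-- ===== PORT B =====
def pvMapB : PySem.Dict Char Char := PySem.Dict.ofList [('L', 'R'), ('l', 'r'), ('R', 'L'), ('r', 'l')]

-- B: if name and name[-1] in mapping: return name[:-1] + mapping[name[-1]] else None
def get_opposite_suffix_alt (name : String) : Option String :=
  let s := name.toList
  match PySem.List.pyGet? s (-1) with
  | none => none
  | some c =>
    match PySem.Dict.get? pvMapB c with
    | some o => some (String.ofList (PySem.List.slice s none (some (-1)) ++ [o]))
    | none => none

-- ===== PRECONDITION & SPEC =====
def Spec_get_opposite_suffix (name : String) (out : Option String) : Prop := out = get_opposite_suffix_alt name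
instance (name : String) (out : Option String) : Decidable (Spec_get_opposite_suffix name out) := by unfold Spec_get_opposite_suffix; infer_instance

-- ===== CLAIM (what is proved, stated in full; the proofs are below) =====
def Claim_equal_get_opposite_suffix : Prop := ∀ (name : String), Dom_get_opposite_suffix name → Spec_get_opposite_suffix name (get_opposite_suffix name)

-- ===== LEMMAS AND PROOFS =====

lemma concat_eq_concat_last {u t : List Char} {x c : Char} (hu : u ++ [x] = t ++ [c]) : x = c := by
  have := List.concat_inj.mp (by simpa [List.concat_eq_append] using hu)
  exact this.2

lemma endswith_concat_single (t : List Char) (c x : Char) :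
    PySem.Chars.endswith (t ++ [c]) [x] = (x == c) := by
  by_cases h : x = c
  · subst h
    have hx : PySem.Chars.endswith (t ++ [x]) [x] = true := by
      rw [PySem.Chars.endswith_iff]; exact ⟨t, rfl⟩
    simp [hx]
  · have hx : PySem.Chars.endswith (t ++ [c]) [x] = false := by
      rw [Bool.eq_false_iff]
      intro hb
      rw [PySem.Chars.endswith_iff] at hb
      obtain ⟨u, hu⟩ := hb
      exact h (concat_eq_concat_last hu)
    simp [hx, h]

lemma endswith_concat_pair_false (t : List Char) (c a x : Char) (h : x ≠ c) :
    PySem.Chars.endswith (t ++ [c]) [a, x] = false := by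
  rw [Bool.eq_false_iff]
  intro hb
  rw [PySem.Chars.endswith_iff] at hb
  obtain ⟨u, hu⟩ := hb
  have h1 : (u ++ [a]) ++ [x] = t ++ [c] := by simpa using hu
  exact h (concat_eq_concat_last h1)

lemma pyGet?_concat_neg_one (t : List Char) (c : Char) :
    PySem.List.pyGet? (t ++ [c]) (-1) = some c := by
  simp [PySem.List.pyGet?, PySem.List.pyIdx?]

lemma pvMapB_items : pvMapB.items = [('L', 'R'), ('l', 'r'), ('R', 'L'), ('r', 'l')] := by decide

-- the two ports agree on every list of characters
lemma core_eq (s : List Char) :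
    (pvLoopA s pvSuffixesA).map String.ofList =
      (match PySem.List.pyGet? s (-1) with
       | none => none
       | some c =>
         match PySem.Dict.get? pvMapB c with
         | some o => some (String.ofList (PySem.List.slice s none (some (-1)) ++ [o]))
         | none => none) := by
  rcases List.eq_nil_or_concat s with rfl | ⟨t, c, rfl⟩
  · decide
  · rw [List.concat_eq_append, pyGet?_concat_neg_one]
    by_cases hL : c = 'L'
    · subst hL
      simp [pvLoopA, pvSuffixesA, endswith_concat_single, PySem.Dict.get?, pvMapB_items]
    by_cases hl : c = 'l'
    · subst hl
      simp [pvLoopA, pvSuffixesA, endswith_concat_single, PySem.Dict.get?, pvMapB_items, List.find?]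
    by_cases hR : c = 'R'
    · subst hR
      simp [pvLoopA, pvSuffixesA, endswith_concat_single, PySem.Dict.get?, pvMapB_items, List.find?]
    by_cases hr : c = 'r'
    · subst hr
      simp [pvLoopA, pvSuffixesA, endswith_concat_single, PySem.Dict.get?, pvMapB_items, List.find?]
    · have hL' : 'L' ≠ c := fun e => hL e.symm
      have hl' : 'l' ≠ c := fun e => hl e.symm
      have hR' : 'R' ≠ c := fun e => hR e.symm
      have hr' : 'r' ≠ c := fun e => hr e.symm
      have bL : ('L' == c) = false := by simp [hL']
      have bl : ('l' == c) = false := by simp [hl']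
      have bR : ('R' == c) = false := by simp [hR']
      have br : ('r' == c) = false := by simp [hr']
      simp [bL, bl, bR, br, pvLoopA, pvSuffixesA, endswith_concat_single,
        endswith_concat_pair_false t c _ _ hL', endswith_concat_pair_false t c _ _ hl',
        endswith_concat_pair_false t c _ _ hR', endswith_concat_pair_false t c _ _ hr',
        PySem.Dict.get?, pvMapB_items, List.find?]

-- ===== VERDICT (by name: the statement is the Claim_ definition above) =====
theorem get_opposite_suffix_spec : Claim_equal_get_opposite_suffix := by
  intro name _
  unfold Spec_get_opposite_suffix get_opposite_suffix get_opposite_suffix_alt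
  exact core_eq name.toList
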